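-- pv_equiv track=rewrite | github.com/nick72bluea/Jukebox-Display | poster_engine.py | clean_album_title
-- ===== SOURCE A (Python) =====
-- def clean_album_title(title):
--     keywords = [" (deluxe", " [deluxe", " - deluxe", " (remaster", " [remaster", " - remaster", " (expanded", " [expanded", " - expanded", " (original", " [original", " - original"]
--     lower_title = title.lower()
--     for kw in keywords:
--         if kw in lower_title:
--             title = title[:lower_title.index(kw)]
--             lower_title = title.lower()
--     return title.strip() if title.strip() else title
-- ===== SOURCE B (Python) =====
-- def clean_album_title(title):
--     keywords = [" (deluxe", " [deluxe", " - deluxe", " (remaster", " [remaster", " - remaster", " (expanded", " [expanded", " - expanded", " (original", " [original", " - original"]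
--     lower_title = title.lower()
--     hits = [i for i in (lower_title.find(kw) for kw in keywords) if i != -1]
--     cut = min(hits, default=len(title))
--     result = title[:cut]
--     stripped = result.strip()
--     return stripped if stripped else result
-- ===== Notes on version B (the rewrite author's own statement) =====
-- stated objective: simpler
-- what changed: A repeatedly truncates the title and re-lowercases it once per matching keyword; B lowercases once, takes the minimum first-occurrence index over all keywords (default len) and slices once at that cut.
import Mathlib
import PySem

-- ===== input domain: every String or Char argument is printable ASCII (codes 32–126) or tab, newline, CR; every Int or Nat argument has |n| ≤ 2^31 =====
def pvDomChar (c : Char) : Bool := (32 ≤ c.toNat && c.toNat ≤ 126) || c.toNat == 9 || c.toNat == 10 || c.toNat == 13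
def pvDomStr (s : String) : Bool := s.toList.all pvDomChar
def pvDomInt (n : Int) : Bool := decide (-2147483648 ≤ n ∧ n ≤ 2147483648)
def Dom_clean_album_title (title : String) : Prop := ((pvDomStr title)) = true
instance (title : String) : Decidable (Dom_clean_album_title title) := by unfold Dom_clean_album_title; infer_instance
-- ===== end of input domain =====

-- B lowercases once, takes the minimum first-occurrence index over all keywords and slices once,
-- instead of A's repeated truncate-and-relower loop; objective: simpler (same exact return value).

-- ===== PORT A =====
-- the shared keyword list of both Pythons
def pvKw : List (List Char) :=
  [" (deluxe".toList, " [deluxe".toList, " - deluxe".toList,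
   " (remaster".toList, " [remaster".toList, " - remaster".toList,
   " (expanded".toList, " [expanded".toList, " - expanded".toList,
   " (original".toList, " [original".toList, " - original".toList]

-- loop body of A: state is (title, lower_title); `lower_title.index(kw)` is guarded by
-- `kw in lower_title`, where Python's .index returns exactly .find (PySem.Chars.find)
def pvStepA (st : List Char × List Char) (kw : List Char) : List Char × List Char :=
  if PySem.Chars.isIn kw st.2 then
    let t' := PySem.List.slice st.1 none (some (PySem.Chars.find st.2 kw))
    (t', PySem.Chars.lower t')
  else st

def clean_album_title (title : String) : String :=
  let t := title.toList
  let r := (pvKw.foldl pvStepA (t, PySem.Chars.lower t)).1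
  let st := PySem.Chars.strip r
  String.ofList (if st = [] then r else st)

-- ===== PORT B =====
def clean_album_title_alt (title : String) : String :=
  let t := title.toList
  let lower_title := PySem.Chars.lower t
  let hits := (pvKw.map (fun kw => PySem.Chars.find lower_title kw)).filter (fun i => i ≠ -1)
  let cut := PySem.List.minD hits (fun i => i) (t.length : Int)
  let result := PySem.List.slice t none (some cut)
  let stripped := PySem.Chars.strip result
  String.ofList (if stripped = [] then result else stripped)

-- ===== PRECONDITION & SPEC =====
def Spec_clean_album_title (title : String) (out : String) : Prop := out = clean_album_title_alt title
instance (title : String) (out : String) : Decidable (Spec_clean_album_title title out) := by unfold Spec_clean_album_title; infer_instance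

-- ===== CLAIM (what is proved, stated in full; the proofs are below) =====
def Claim_equal_clean_album_title : Prop := ∀ (title : String), Dom_clean_album_title title → Spec_clean_album_title title (clean_album_title title)

-- ===== LEMMAS AND PROOFS =====

-- B's cut, as a function of the keyword list and the lowered text (default = text length)
def pvCut (kws : List (List Char)) (s : List Char) : Int :=
  PySem.List.minD ((kws.map (fun kw => PySem.Chars.find s kw)).filter (fun i => i ≠ -1))
    (fun i => i) (s.length : Int)

-- concrete check: no keyword can start strictly inside an occurrence of another keyword
-- (a mismatch appears already inside the overlap of the two keyword texts)
def pvOverlapFree : Bool :=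
  pvKw.all fun kw' => pvKw.all fun kw =>
    (List.range kw'.length).all fun j =>
      decide (j = 0) ||
        (List.range (min kw.length (kw'.length - j))).any fun i =>
          kw.getD i ' ' != kw'.getD (j + i) ' '

lemma pvOverlapFree_true : pvOverlapFree = true := by decide

lemma pvKw_ne_nil : ∀ kw ∈ pvKw, kw ≠ [] := by decide

-- occurrences in a prefix are occurrences in the whole text
lemma prefix_drop_take {sub s : List Char} {n q : Nat}
    (h : sub <+: (s.take n).drop q) : sub <+: s.drop q := by
  rw [List.drop_take] at h
  exact h.trans (List.take_prefix _ _)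

-- first-occurrence characterisation of find
lemma find_eq_of {s sub : List Char} {q : Nat}
    (h1 : sub <+: s.drop q) (h2 : ∀ i, i < q → ¬ sub <+: s.drop i) :
    PySem.Chars.find s sub = (q : Int) := by
  have hin : PySem.Chars.isIn sub s = true :=
    (PySem.Chars.exists_prefix_drop_iff_isIn sub s).1 ⟨q, h1⟩
  have hnn : 0 ≤ PySem.Chars.find s sub :=
    (PySem.Chars.find_nonneg_iff s sub).2 ((PySem.Chars.isIn_iff_infix sub s).1 hin)
  obtain ⟨hpre, hmin⟩ := PySem.Chars.find_spec hnn
  have h1' : ¬ ((PySem.Chars.find s sub).toNat < q) := fun hlt => h2 _ hlt hpre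
  have h2' : ¬ (q < (PySem.Chars.find s sub).toNat) := fun hlt => hmin _ hlt h1
  omega

-- two occurrences of keywords never overlap: the earlier one ends before the later starts
lemma no_cross {s kw kw' : List Char} (hkw : kw ∈ pvKw) (hkw' : kw' ∈ pvKw)
    {q p : Nat} (h1 : kw' <+: s.drop q) (h2 : kw <+: s.drop p) (hqp : q < p) :
    q + kw'.length ≤ p := by
  by_contra hc
  -- kw starts at offset j = p - q inside the kw' occurrence
  set j := p - q with hj
  have hj1 : 1 ≤ j := by omega
  have hj2 : j < kw'.length := by omega
  have hall := pvOverlapFree_true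
  unfold pvOverlapFree at hall
  rw [List.all_eq_true] at hall
  have hall' := (List.all_eq_true.1 (hall kw' hkw')) kw hkw
  rw [List.all_eq_true] at hall'
  have hj' := hall' j (List.mem_range.2 hj2)
  rw [Bool.or_eq_true, List.any_eq_true] at hj'
  rcases hj' with hj0 | ⟨i, hi, hne⟩
  · simp at hj0; omega
  · rw [List.mem_range] at hi
    have hik : i < kw.length := by omega
    have hjik : j + i < kw'.length := by omega
    -- both sides are the same character of s at position p + i
    have hlen' : kw'.length ≤ s.length - q := by
      have := h1.length_le; simp at this; omega
    have hlen : kw.length ≤ s.length - p := by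
      have := h2.length_le; simp at this; omega
    have e1 : kw[i]'hik = s[p + i]'(by omega) := by
      have := h2.getElem hik
      rw [this, List.getElem_drop]
    have e2 : kw'[j + i]'hjik = s[q + (j + i)]'(by omega) := by
      have := h1.getElem hjik
      rw [this, List.getElem_drop]
    have hchar : kw.getD i ' ' = kw'.getD (j + i) ' ' := by
      rw [List.getD_eq_getElem _ _ hik, List.getD_eq_getElem _ _ hjik, e1, e2]
      congr 1
      omega
    simp only [bne_iff_ne, ne_eq] at hne
    exact hne hchar

-- find of a keyword in the text truncated at another keyword's first occurrence
lemma find_take {s kw kw' : List Char} (hkw : kw ∈ pvKw) (hkw' : kw' ∈ pvKw)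
    (hp : 0 ≤ PySem.Chars.find s kw) :
    PySem.Chars.find (s.take (PySem.Chars.find s kw).toNat) kw'
      = if 0 ≤ PySem.Chars.find s kw' ∧ PySem.Chars.find s kw' < PySem.Chars.find s kw
        then PySem.Chars.find s kw' else -1 := by
  obtain ⟨hkpre, hkmin⟩ := PySem.Chars.find_spec hp
  split_ifs with hcond
  · obtain ⟨hf0, hflt⟩ := hcond
    obtain ⟨hpre', hmin'⟩ := PySem.Chars.find_spec hf0
    have hqp : (PySem.Chars.find s kw').toNat < (PySem.Chars.find s kw).toNat := by omega
    have hend := no_cross hkw hkw' hpre' hkpre hqp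
    have h1 : kw' <+: (s.take (PySem.Chars.find s kw).toNat).drop (PySem.Chars.find s kw').toNat := by
      rw [List.drop_take, List.prefix_take_iff]
      exact ⟨hpre', by omega⟩
    have h2 : ∀ i, i < (PySem.Chars.find s kw').toNat →
        ¬ kw' <+: (s.take (PySem.Chars.find s kw).toNat).drop i :=
      fun i hi hpre => hmin' i hi (prefix_drop_take hpre)
    rw [find_eq_of h1 h2]
    omega
  · rw [PySem.Chars.find_eq_neg_one_iff]
    intro hinf
    obtain ⟨j, hj⟩ := (PySem.Chars.exists_prefix_drop_iff_isIn kw' _).2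
      ((PySem.Chars.isIn_iff_infix kw' _).2 hinf)
    have hjfull : kw' <+: s.drop j := prefix_drop_take hj
    have hf0 : 0 ≤ PySem.Chars.find s kw' :=
      (PySem.Chars.find_nonneg_iff s kw').2
        ((PySem.Chars.isIn_iff_infix kw' s).1
          ((PySem.Chars.exists_prefix_drop_iff_isIn kw' s).1 ⟨j, hjfull⟩))
    obtain ⟨hpre', hmin'⟩ := PySem.Chars.find_spec hf0
    have hge : (PySem.Chars.find s kw').toNat ≤ j := by
      by_contra hlt
      exact hmin' j (by omega) hjfull
    have hne : kw' ≠ [] := pvKw_ne_nil kw' hkw'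
    have hlenpos : 0 < kw'.length := List.length_pos_iff.2 hne
    have := hj.length_le
    simp only [List.length_drop, List.length_take] at this
    omega

-- the truncated hit list is the full hit list further filtered below the cut p
lemma map_find_take {s : List Char} {kws : List (List Char)} {kw : List Char}
    (hkw : kw ∈ pvKw) (hkws : ∀ k ∈ kws, k ∈ pvKw)
    (hp : 0 ≤ PySem.Chars.find s kw) :
    ((kws.map (fun k => PySem.Chars.find (s.take (PySem.Chars.find s kw).toNat) k)).filter
        (fun i => i ≠ -1))
      = (((kws.map (fun k => PySem.Chars.find s k)).filter (fun i => i ≠ -1)).filter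
          (fun i => i < PySem.Chars.find s kw)) := by
  induction kws with
  | nil => simp
  | cons k kws ih =>
    have hk := hkws k (by simp)
    have hrest : ∀ x ∈ kws, x ∈ pvKw := fun x hx => hkws x (by simp [hx])
    have hm1 : -1 ≤ PySem.Chars.find s k := PySem.Chars.neg_one_le_find s k
    simp only [List.map_cons, List.filter_cons]
    rw [find_take hkw hk hp, ih hrest]
    by_cases h0 : 0 ≤ PySem.Chars.find s k ∧ PySem.Chars.find s k < PySem.Chars.find s kw
    · rw [if_pos h0, if_pos (decide_eq_true (show PySem.Chars.find s k ≠ -1 by omega)),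
        if_pos (decide_eq_true (show PySem.Chars.find s k ≠ -1 by omega)),
        List.filter_cons, if_pos (decide_eq_true h0.2)]
    · rw [if_neg h0]
      by_cases hm : PySem.Chars.find s k = -1
      · rw [if_neg (by simp), if_neg (by rw [hm]; simp)]
      · have h1 : ¬ PySem.Chars.find s k < PySem.Chars.find s kw := by
          intro hlt; exact h0 ⟨by omega, hlt⟩
        rw [if_neg (by simp), if_pos (decide_eq_true hm), List.filter_cons,
          if_neg (by simp [h1])]

-- PySem.List.min? with the identity key is a left fold of `min`
lemma min?_cons (l : List Int) (x : Int) :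
    PySem.List.min? (x :: l) (fun i => i) = some (l.foldl min x) := by
  induction l generalizing x with
  | nil => rfl
  | cons y l ih =>
    have e1 : PySem.List.min? (x :: y :: l) (fun i => i)
        = PySem.List.min? (min x y :: l) (fun i => i) := by
      unfold PySem.List.min?
      rw [List.foldl_cons, List.foldl_cons, List.foldl_cons]
      congr 1
      show (if y < x then some y else some x) = some (min x y)
      split_ifs with h
      · rw [min_eq_right h.le]
      · rw [min_eq_left (by omega)]
    rw [e1, ih]
    rw [List.foldl_cons]

lemma foldl_min_le (l : List Int) (a : Int) : l.foldl min a ≤ a := by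
  induction l generalizing a with
  | nil => simp
  | cons x l ih => simpa using le_trans (ih (min a x)) (min_le_left a x)

lemma foldl_min_nonneg (l : List Int) (a : Int) (ha : 0 ≤ a) (hl : ∀ x ∈ l, 0 ≤ x) :
    0 ≤ l.foldl min a := by
  induction l generalizing a with
  | nil => simpa
  | cons x l ih =>
    simp only [List.foldl_cons]
    exact ih _ (le_min ha (hl x (by simp))) (fun y hy => hl y (by simp [hy]))

lemma foldl_min_filter_lt (l : List Int) (p a : Int) (ha : a < p) :
    (l.filter (fun x => x < p)).foldl min a = l.foldl min a := by
  induction l generalizing a with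
  | nil => simp
  | cons x l ih =>
    simp only [List.filter_cons, List.foldl_cons]
    by_cases hx : x < p
    · rw [if_pos (decide_eq_true hx), List.foldl_cons]
      exact ih (min a x) (lt_of_le_of_lt (min_le_left a x) ha)
    · rw [if_neg (by simp [hx]), min_eq_left (by omega)]
      exact ih a ha

lemma minD_filter_lt (l : List Int) (p : Int) :
    PySem.List.minD (l.filter (fun x => x < p)) (fun i => i) p = l.foldl min p := by
  induction l with
  | nil => rfl
  | cons x l ih =>
    simp only [List.filter_cons, List.foldl_cons]
    by_cases hx : x < p
    · rw [if_pos (decide_eq_true hx)]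
      unfold PySem.List.minD
      rw [min?_cons]
      rw [Option.getD_some, foldl_min_filter_lt l p x hx, min_eq_right hx.le]
    · rw [if_neg (by simp [hx]), ih, min_eq_left (by omega)]

lemma hits_nonneg (kws : List (List Char)) (s : List Char) :
    ∀ x ∈ (kws.map (fun kw => PySem.Chars.find s kw)).filter (fun i => i ≠ -1), 0 ≤ x := by
  intro x hx
  rw [List.mem_filter] at hx
  obtain ⟨hx1, hx2⟩ := hx
  obtain ⟨k, _, rfl⟩ := List.mem_map.1 hx1
  have := PySem.Chars.neg_one_le_find s k
  simp at hx2
  omega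

lemma pvCut_nonneg (kws : List (List Char)) (s : List Char) : 0 ≤ pvCut kws s := by
  unfold pvCut
  rcases h : (kws.map (fun kw => PySem.Chars.find s kw)).filter (fun i => i ≠ -1) with _ | ⟨x, l⟩
  · unfold PySem.List.minD
    rw [h]
    simp [PySem.List.min?]
  · unfold PySem.List.minD
    rw [h, min?_cons, Option.getD_some]
    have hx := hits_nonneg kws s
    rw [h] at hx
    exact foldl_min_nonneg l x (hx x (by simp)) (fun y hy => hx y (by simp [hy]))

-- main loop invariant: A's fold truncates the title exactly at B's cut
lemma foldA_eq (kws : List (List Char)) (hkws : ∀ k ∈ kws, k ∈ pvKw) (t : List Char) :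
    kws.foldl pvStepA (t, PySem.Chars.lower t)
      = (t.take (pvCut kws (PySem.Chars.lower t)).toNat,
         PySem.Chars.lower (t.take (pvCut kws (PySem.Chars.lower t)).toNat)) := by
  induction kws generalizing t with
  | nil => simp [pvCut, PySem.List.minD, PySem.List.min?, PySem.Chars.lower]
  | cons kw kws ih =>
    have hkw := hkws kw (by simp)
    have hrest : ∀ k ∈ kws, k ∈ pvKw := fun k hk => hkws k (by simp [hk])
    by_cases hin : PySem.Chars.isIn kw (PySem.Chars.lower t) = true
    · have hp : 0 ≤ PySem.Chars.find (PySem.Chars.lower t) kw :=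
        (PySem.Chars.find_nonneg_iff _ _).2 ((PySem.Chars.isIn_iff_infix _ _).1 hin)
      have hle : PySem.Chars.find (PySem.Chars.lower t) kw ≤ ((PySem.Chars.lower t).length : Int) :=
        PySem.Chars.find_le_length _ _
      have hlen : (PySem.Chars.lower t).length = t.length := by simp [PySem.Chars.lower]
      set s := PySem.Chars.lower t with hs
      set p := PySem.Chars.find s kw with hpdef
      have hslice : PySem.List.slice t none (some (PySem.Chars.find s kw)) = t.take p.toNat :=
        PySem.List.slice_to t hp
      have hstep : pvStepA (t, s) kw = (t.take p.toNat, PySem.Chars.lower (t.take p.toNat)) := by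
        simp [pvStepA, hin, hslice]
      have hlow : PySem.Chars.lower (t.take p.toNat) = s.take p.toNat := by
        rw [hs]; simp [PySem.Chars.lower, List.map_take]
      have e1 : pvCut (kw :: kws) s
          = ((kws.map (fun k => PySem.Chars.find s k)).filter (fun i => i ≠ -1)).foldl min p := by
        unfold pvCut
        simp only [List.map_cons, List.filter_cons]
        rw [if_pos (decide_eq_true (show p ≠ -1 by omega))]
        unfold PySem.List.minD
        rw [min?_cons, Option.getD_some]
      have e2 : pvCut kws (s.take p.toNat)
          = ((kws.map (fun k => PySem.Chars.find s k)).filter (fun i => i ≠ -1)).foldl min p := by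
        unfold pvCut
        rw [map_find_take hkw hrest hp]
        have hlt : (((s.take p.toNat).length : Nat) : Int) = p := by
          rw [List.length_take, min_eq_left (by omega)]
          exact Int.toNat_of_nonneg hp
        rw [hlt, minD_filter_lt]
      have hcle : pvCut (kw :: kws) s ≤ p := by rw [e1]; exact foldl_min_le _ _
      have hcnn : 0 ≤ pvCut (kw :: kws) s := pvCut_nonneg _ _
      rw [List.foldl_cons, hstep, ih hrest (t.take p.toNat), hlow, e2, ← e1]
      have htake : (t.take p.toNat).take (pvCut (kw :: kws) s).toNat
          = t.take (pvCut (kw :: kws) s).toNat := by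
        rw [List.take_take, min_eq_left (by omega)]
      rw [htake]
    · have hm : PySem.Chars.find (PySem.Chars.lower t) kw = -1 :=
        (PySem.Chars.find_eq_neg_one_iff _ _).2
          (fun hinf => hin ((PySem.Chars.isIn_iff_infix _ _).2 hinf))
      have hstep : pvStepA (t, PySem.Chars.lower t) kw = (t, PySem.Chars.lower t) := by
        simp [pvStepA, hin]
      have hcut : pvCut (kw :: kws) (PySem.Chars.lower t) = pvCut kws (PySem.Chars.lower t) := by
        unfold pvCut
        simp only [List.map_cons, List.filter_cons]
        rw [if_neg (by rw [hm]; simp)]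
      rw [List.foldl_cons, hstep, ih hrest t, hcut]

-- ===== VERDICT (by name: the statement is the Claim_ definition above) =====
theorem clean_album_title_spec : Claim_equal_clean_album_title := by
  intro title _
  unfold Spec_clean_album_title clean_album_title clean_album_title_alt
  have hfold := foldA_eq pvKw (fun k hk => hk) title.toList
  have hlen : (((PySem.Chars.lower title.toList).length : Nat) : Int)
      = ((title.toList.length : Nat) : Int) := by simp [PySem.Chars.lower]
  have hnn : 0 ≤ pvCut pvKw (PySem.Chars.lower title.toList) := pvCut_nonneg _ _
  simp only [hfold]
  unfold pvCut at hnn ⊢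
  rw [← hlen, PySem.List.slice_to title.toList hnn]
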